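-- pv_equiv track=rewrite | github.com/Kelin-hao/CrawlCommet | CrawlComment.py | commentLength
-- ===== SOURCE A (Python) =====
-- def commentLength(str):
--     str1 = str.strip()
--     index = 0
--     count = 0
--     while index < len(str1):
--         while str1[index] != " ": # 当不是空格是，下标加1
--             index += 1
--             if index == len(str1): # 当下标大小跟字符串长度一样时结束当前循环
--                 break
--         count += 1  # 遇到空格加1
--         if index == len(str1): # 当下标大小跟字符串长度一样时结束当前循环
--             break
--         while str1[index] == " ": # 当有两个空格时，下标加1，防止以一个空格算一个单词
--             index += 1
--     if(count<=5):
--         return True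
--     return False
-- ===== SOURCE B (Python) =====
-- import re
--
-- def commentLength(str):
--     return len(re.split(r' +', str.strip())) <= 5
-- ===== Notes on version B (the rewrite author's own statement) =====
-- stated objective: idiomatic
-- what changed: Replaces A's hand-written three-nested-while character scan with index bookkeeping by a single regex tokenization: len(re.split(r' +', str.strip())) <= 5.
import Mathlib
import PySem

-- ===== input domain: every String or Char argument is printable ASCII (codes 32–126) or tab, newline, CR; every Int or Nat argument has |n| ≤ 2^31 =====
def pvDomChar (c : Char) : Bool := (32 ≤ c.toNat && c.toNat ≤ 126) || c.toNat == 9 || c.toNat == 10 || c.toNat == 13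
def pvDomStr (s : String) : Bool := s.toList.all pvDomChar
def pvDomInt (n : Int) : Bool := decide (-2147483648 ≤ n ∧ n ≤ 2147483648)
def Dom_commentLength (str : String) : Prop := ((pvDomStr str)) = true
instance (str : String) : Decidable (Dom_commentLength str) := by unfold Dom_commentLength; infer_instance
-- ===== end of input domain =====

-- B replaces A's three-nested-while character scan by one regex tokenization (re.split(r' +', s.strip())); same cost, more idiomatic.

-- ===== PORT A =====
-- inner while:  while str1[index] != " ": index += 1; if index == len(str1): break
-- (fuel makes the recursion structural; fuel = l.length is always enough)
def skipWord : Nat → List Char → Nat → Nat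
  | 0, _, i => i
  | fuel + 1, l, i =>
    if h : i < l.length then
      if l[i] != ' ' then skipWord fuel l (i + 1) else i
    else i

-- inner while:  while str1[index] == " ": index += 1
-- (the `i < l.length` guard is unreachable from A's calls: str1 is stripped, so a space run never reaches the end)
def skipSpaces : Nat → List Char → Nat → Nat
  | 0, _, i => i
  | fuel + 1, l, i =>
    if h : i < l.length then
      if l[i] == ' ' then skipSpaces fuel l (i + 1) else i
    else i

-- outer while loop of A, state (index, count)
def outerA : Nat → List Char → Nat → Nat → Nat
  | 0, _, _, count => count
  | fuel + 1, l, i, count =>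
    if i < l.length then
      if skipWord l.length l i = l.length then count + 1
      else outerA fuel l (skipSpaces l.length l (skipWord l.length l i)) (count + 1)
    else count

def commentLength (str : String) : Bool :=
  let str1 := PySem.Chars.strip str.toList
  decide (outerA (str1.length + 1) str1 0 0 ≤ 5)

-- ===== PORT B =====
-- re.split(r' +', t): split on maximal runs of spaces (empty token at an end that
-- starts/ends with a space, [""] for t = ""); exact hand port of that regex split.
def splitSR : List Char → List (List Char)
  | [] => [[]]
  | c :: cs =>
    if c = ' ' then
      if cs.head? = some ' ' then splitSR cs        -- inside a run of spaces: same boundary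
      else [] :: splitSR cs                         -- end of a run: one boundary
    else (c :: (splitSR cs).headI) :: (splitSR cs).tail

def commentLength_alt (str : String) : Bool :=
  decide ((splitSR (PySem.Chars.strip str.toList)).length ≤ 5)

-- ===== PRECONDITION & SPEC =====
def Spec_commentLength (str : String) (out : Bool) : Prop := out = commentLength_alt str
instance (str : String) (out : Bool) : Decidable (Spec_commentLength str out) := by unfold Spec_commentLength; infer_instance

-- ===== CLAIM (what is proved, stated in full; the proofs are below) =====
def Claim_equal_commentLength : Prop := ∀ (str : String), Dom_commentLength str → Spec_commentLength str (commentLength str)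

-- ===== LEMMAS AND PROOFS =====

theorem dropdrop_lt (t : List Char) (ht : t ≠ []) :
    ((t.dropWhile (fun x => x != ' ')).dropWhile (fun x => x == ' ')).length < t.length := by
  cases t with
  | nil => exact absurd rfl ht
  | cons a as =>
    by_cases ha : a = ' '
    · rw [List.dropWhile_cons, if_neg (by simp [ha]), List.dropWhile_cons, if_pos (by simp [ha])]
      have := List.length_dropWhile_le (fun x : Char => x == ' ') as
      simp only [List.length_cons]
      omega
    · rw [List.dropWhile_cons, if_pos (by simp [ha])]
      have h1 := List.length_dropWhile_le (fun x : Char => x != ' ') as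
      have h2 := List.length_dropWhile_le (fun x : Char => x == ' ') (as.dropWhile (fun x => x != ' '))
      simp only [List.length_cons]
      omega

-- list-level reformulation of A's outer loop, on the suffix l.drop i
def outerL (t : List Char) (c : Nat) : Nat :=
  if t = [] then c
  else
    if t.dropWhile (fun x => x != ' ') = [] then c + 1
    else outerL ((t.dropWhile (fun x => x != ' ')).dropWhile (fun x => x == ' ')) (c + 1)
termination_by t.length
decreasing_by
  exact dropdrop_lt t ‹t ≠ []›

theorem skipWord_le (fuel : Nat) (l : List Char) (i : Nat) (hi : i ≤ l.length) :
    skipWord fuel l i ≤ l.length := by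
  induction fuel generalizing i with
  | zero => exact hi
  | succ fuel ih =>
    rw [skipWord]
    split
    · split
      · exact ih (i + 1) (by omega)
      · exact hi
    · exact hi

theorem skipSpaces_le (fuel : Nat) (l : List Char) (i : Nat) (hi : i ≤ l.length) :
    skipSpaces fuel l i ≤ l.length := by
  induction fuel generalizing i with
  | zero => exact hi
  | succ fuel ih =>
    rw [skipSpaces]
    split
    · split
      · exact ih (i + 1) (by omega)
      · exact hi
    · exact hi

theorem skipWord_drop (fuel : Nat) (l : List Char) (i : Nat) (hf : l.length ≤ i + fuel) :
    l.drop (skipWord fuel l i) = (l.drop i).dropWhile (fun x => x != ' ') := by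
  induction fuel generalizing i with
  | zero =>
    have hd : l.drop i = [] := by rw [List.drop_eq_nil_iff]; omega
    show l.drop i = _
    rw [hd, List.dropWhile_nil]
  | succ fuel ih =>
    rw [skipWord]
    split
    · rename_i h
      rw [List.drop_eq_getElem_cons h, List.dropWhile_cons]
      split
      · exact ih (i + 1) (by omega)
      · exact List.drop_eq_getElem_cons h
    · rename_i h
      have hd : l.drop i = [] := by rw [List.drop_eq_nil_iff]; omega
      rw [hd, List.dropWhile_nil]

theorem skipSpaces_drop (fuel : Nat) (l : List Char) (i : Nat) (hf : l.length ≤ i + fuel) :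
    l.drop (skipSpaces fuel l i) = (l.drop i).dropWhile (fun x => x == ' ') := by
  induction fuel generalizing i with
  | zero =>
    have hd : l.drop i = [] := by rw [List.drop_eq_nil_iff]; omega
    show l.drop i = _
    rw [hd, List.dropWhile_nil]
  | succ fuel ih =>
    rw [skipSpaces]
    split
    · rename_i h
      rw [List.drop_eq_getElem_cons h, List.dropWhile_cons]
      split
      · exact ih (i + 1) (by omega)
      · exact List.drop_eq_getElem_cons h
    · rename_i h
      have hd : l.drop i = [] := by rw [List.drop_eq_nil_iff]; omega
      rw [hd, List.dropWhile_nil]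

theorem outerA_eq_outerL (fuel : Nat) (l : List Char) (i c : Nat)
    (hf : l.length < i + fuel) (hi : i ≤ l.length) :
    outerA fuel l i c = outerL (l.drop i) c := by
  induction fuel generalizing i c with
  | zero => exact absurd hi (by omega)
  | succ fuel ih =>
    rw [outerA, outerL]
    split
    · rename_i h
      have hne : l.drop i ≠ [] := by
        intro hnil
        rw [List.drop_eq_nil_iff] at hnil
        omega
      rw [if_neg hne]
      have hj := skipWord_drop l.length l i (by omega)
      have hjle : skipWord l.length l i ≤ l.length := skipWord_le l.length l i hi
      split
      · rename_i hj0
        rw [if_pos (by rw [← hj, hj0, List.drop_length])]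
      · rename_i hj0
        have h1 : (l.drop i).dropWhile (fun x => x != ' ') ≠ [] := by
          rw [← hj]
          intro hnil
          rw [List.drop_eq_nil_iff] at hnil
          omega
        have hkle : skipSpaces l.length l (skipWord l.length l i) ≤ l.length :=
          skipSpaces_le l.length l (skipWord l.length l i) hjle
        have hk := skipSpaces_drop l.length l (skipWord l.length l i) (by omega)
        have hki : i < skipSpaces l.length l (skipWord l.length l i) := by
          have hlt := dropdrop_lt (l.drop i) hne
          rw [← hj, ← hk] at hlt
          rw [List.length_drop, List.length_drop] at hlt
          omega
        rw [if_neg h1, ← hj, ← hk]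
        exact ih (skipSpaces l.length l (skipWord l.length l i)) (c + 1) (by omega) hkle
    · rename_i h
      rw [if_pos (by rw [List.drop_eq_nil_iff]; omega)]

theorem splitSR_length_pos : ∀ t : List Char, 0 < (splitSR t).length
  | [] => by simp [splitSR]
  | c :: cs => by
    rw [splitSR]
    split
    · split
      · exact splitSR_length_pos cs
      · simp
    · simp

theorem splitSR_cons_nonspace (c : Char) (cs : List Char) (h : c ≠ ' ') :
    (splitSR (c :: cs)).length = (splitSR cs).length := by
  rw [splitSR, if_neg h]
  have := splitSR_length_pos cs
  cases hs : splitSR cs with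
  | nil => rw [hs] at this; simp at this
  | cons a as => simp

theorem splitSR_dropWhile (t : List Char) :
    (splitSR t).length = (splitSR (t.dropWhile (fun x => x != ' '))).length := by
  induction t with
  | nil => simp
  | cons c cs ih =>
    by_cases hc : c = ' '
    · rw [List.dropWhile_cons, if_neg (by simp [hc])]
    · rw [List.dropWhile_cons, if_pos (by simp [hc]), splitSR_cons_nonspace c cs hc]
      exact ih

theorem splitSR_space (cs : List Char) :
    (splitSR (' ' :: cs)).length = 1 + (splitSR (cs.dropWhile (fun x => x == ' '))).length := by
  induction cs with
  | nil => simp [splitSR]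
  | cons c' cs' ih =>
    by_cases hc : c' = ' '
    · subst hc
      rw [show splitSR (' ' :: ' ' :: cs') = splitSR (' ' :: cs') from by
            rw [splitSR]; simp]
      rw [ih, List.dropWhile_cons, if_pos (by simp)]
    · rw [show splitSR (' ' :: c' :: cs') = [] :: splitSR (c' :: cs') from by
            rw [splitSR, if_pos rfl, if_neg (by simp [hc])]]
      rw [List.dropWhile_cons, if_neg (by simp [hc])]
      simp [Nat.add_comm]

theorem outerL_eq_splitSR (t : List Char) (ht : t ≠ []) (hlast : t.getLast? ≠ some ' ')
    (c : Nat) : outerL t c = c + (splitSR t).length := by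
  rw [outerL, if_neg ht]
  have h6 := splitSR_dropWhile t
  split
  · rename_i h1
    rw [h6, h1]
    simp [splitSR]
  · rename_i h1
    have hsuf1 : t.dropWhile (fun x => x != ' ') <:+ t := List.dropWhile_suffix _
    obtain ⟨cs, hcs⟩ : ∃ cs, t.dropWhile (fun x => x != ' ') = ' ' :: cs := by
      cases hcase : t.dropWhile (fun x => x != ' ') with
      | nil => exact absurd hcase h1
      | cons a as =>
        have hh := List.head?_dropWhile_not (fun x : Char => x != ' ') t
        rw [hcase] at hh
        simp only [List.head?_cons] at hh
        simp only [bne_eq_false_iff_eq] at hh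
        subst hh
        exact ⟨as, rfl⟩
    have hdd : (t.dropWhile (fun x => x != ' ')).dropWhile (fun x => x == ' ')
        = cs.dropWhile (fun x => x == ' ') := by
      rw [hcs, List.dropWhile_cons, if_pos (by simp)]
    have ht2ne : cs.dropWhile (fun x => x == ' ') ≠ [] := by
      intro h2
      rw [List.dropWhile_eq_nil_iff] at h2
      -- then every char of ' ' :: cs is a space, and it is a nonempty suffix of t, so t ends in ' '
      have hall : ∀ x ∈ (' ' :: cs), (x == ' ') = true := by
        intro x hx
        rcases List.mem_cons.mp hx with hx | hx
        · simp [hx]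
        · exact h2 x hx
      cases hl : (' ' :: cs).getLast? with
      | none => simp at hl
      | some x =>
        have hx : x = ' ' := by simpa using hall x (List.mem_of_getLast? hl)
        have hlast1 : (' ' :: cs).getLast? = t.getLast? := by
          obtain ⟨u, hu⟩ := hsuf1
          rw [hcs] at hu
          rw [← hu, List.getLast?_append_of_ne_nil u (List.cons_ne_nil _ _)]
        rw [hlast1, hx] at hl
        exact hlast hl
    have hsuf2 : cs.dropWhile (fun x => x == ' ') <:+ t := by
      rw [← hdd]
      exact (List.dropWhile_suffix _).trans hsuf1
    have hlast2 : (cs.dropWhile (fun x => x == ' ')).getLast? = t.getLast? := by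
      obtain ⟨u, hu⟩ := hsuf2
      rw [← hu, List.getLast?_append_of_ne_nil u ht2ne]
    have ih := outerL_eq_splitSR (cs.dropWhile (fun x => x == ' ')) ht2ne
      (by rw [hlast2]; exact hlast) (c + 1)
    rw [hdd, ih, h6, hcs, splitSR_space cs]
    omega
termination_by t.length
decreasing_by
  have hlt := dropdrop_lt t ht
  rw [hdd] at hlt
  exact hlt

theorem strip_getLast (s : List Char) :
    (PySem.Chars.strip s).getLast? ≠ some ' ' := by
  unfold PySem.Chars.strip PySem.Chars.rstrip
  rw [List.getLast?_reverse]
  have hh := List.head?_dropWhile_not PySem.Chars.isspace (PySem.Chars.lstrip s).reverse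
  cases h : ((PySem.Chars.lstrip s).reverse.dropWhile PySem.Chars.isspace).head? with
  | none => simp
  | some a =>
    rw [h] at hh
    intro hcontra
    have ha : a = ' ' := Option.some.inj hcontra
    rw [ha] at hh
    simp [PySem.Chars.isspace] at hh

-- ===== VERDICT (by name: the statement is the Claim_ definition above) =====
theorem commentLength_spec : Claim_equal_commentLength := by
  unfold Claim_equal_commentLength Spec_commentLength
  intro str _
  show decide (outerA ((PySem.Chars.strip str.toList).length + 1) (PySem.Chars.strip str.toList) 0 0 ≤ 5)
      = decide ((splitSR (PySem.Chars.strip str.toList)).length ≤ 5)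
  set l := PySem.Chars.strip str.toList with hl
  have h1 : outerA (l.length + 1) l 0 0 = outerL l 0 := by
    rw [outerA_eq_outerL (l.length + 1) l 0 0 (by omega) (Nat.zero_le _), List.drop_zero]
  by_cases hnil : l = []
  · rw [hnil] at h1 ⊢
    rw [outerL, if_pos rfl] at h1
    rw [h1]
    simp [splitSR]
  · rw [h1, outerL_eq_splitSR l hnil (strip_getLast str.toList) 0]
    simp
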